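-- pv_equiv track=rewrite | github.com/roger-/tmpkit | src/tmpkit/lib/ssh.py | _prefer_kex
-- ===== SOURCE A (Python) =====
-- def _prefer_kex(existing: list[str], preferred_first: list[str]) -> list[str]:
--     out = list(existing)
--     for algo in reversed(preferred_first):
--         try:
--             out.remove(algo)
--         except ValueError:
--             pass
--         out.insert(0, algo)
--     return out
-- ===== SOURCE B (Python) =====
-- def _prefer_kex(existing: list[str], preferred_first: list[str]) -> list[str]:
--     front = list(dict.fromkeys(preferred_first))
--     pending = set(front)
--     remaining = []
--     for x in existing:
--         if x in pending:
--             pending.discard(x)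
--         else:
--             remaining.append(x)
--     return front + remaining
-- ===== Notes on version B (the rewrite author's own statement) =====
-- stated objective: faster
-- what changed: Replaces A's reversed loop of list.remove (a linear scan per preferred algorithm) plus insert-at-front with the deduplicated preferred list computed up front and one forward pass over existing that skips the first occurrence of each preferred algorithm via a pending set.
import Mathlib
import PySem

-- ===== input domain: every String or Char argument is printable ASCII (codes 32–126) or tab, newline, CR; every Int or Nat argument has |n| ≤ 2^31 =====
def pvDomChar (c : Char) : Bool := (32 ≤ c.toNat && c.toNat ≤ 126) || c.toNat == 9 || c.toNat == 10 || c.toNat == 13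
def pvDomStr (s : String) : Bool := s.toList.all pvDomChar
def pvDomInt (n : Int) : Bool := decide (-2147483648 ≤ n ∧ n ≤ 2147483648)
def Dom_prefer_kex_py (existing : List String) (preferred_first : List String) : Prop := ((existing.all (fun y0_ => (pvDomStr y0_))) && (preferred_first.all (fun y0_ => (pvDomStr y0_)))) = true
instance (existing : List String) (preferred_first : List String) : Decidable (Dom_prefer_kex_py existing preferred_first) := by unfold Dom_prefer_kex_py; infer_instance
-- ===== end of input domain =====

-- B replaces A's reversed remove/insert-at-front loop (a linear list.remove scan per preferred
-- algorithm) by dedup(preferred) ++ one forward pass over existing with a pending set (faster).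

-- ===== PORT A =====
-- out = list(existing); for algo in reversed(preferred_first): try out.remove(algo) except pass; out.insert(0, algo)
def prefer_kex_py (existing : List String) (preferred_first : List String) : List String :=
  preferred_first.reverse.foldl
    (fun out algo => algo :: ((PySem.List.remove? out algo).getD out)) existing

-- ===== PORT B =====
-- front = list(dict.fromkeys(preferred_first)); pending = set(front);
-- remaining built in one pass: skip x and discard it from pending if x in pending, else append.
def prefer_kex_py_alt (existing : List String) (preferred_first : List String) : List String :=
  let front := PySem.List.dedup preferred_first
  let r := existing.foldl
    (fun (st : List String × PySem.Set String) x =>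
      if PySem.Set.contains st.2 x then (st.1, PySem.Set.discard st.2 x)
      else (st.1 ++ [x], st.2))
    ([], PySem.Set.ofList front)
  front ++ r.1

-- ===== PRECONDITION & SPEC =====
def Spec_prefer_kex_py (existing : List String) (preferred_first : List String) (out : List String) : Prop := out = prefer_kex_py_alt existing preferred_first
instance (existing : List String) (preferred_first : List String) (out : List String) : Decidable (Spec_prefer_kex_py existing preferred_first out) := by unfold Spec_prefer_kex_py; infer_instance

-- ===== CLAIM (what is proved, stated in full; the proofs are below) =====
def Claim_equal_prefer_kex_py : Prop := ∀ (existing : List String) (preferred_first : List String), Dom_prefer_kex_py existing preferred_first → Spec_prefer_kex_py existing preferred_first (prefer_kex_py existing preferred_first)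

-- ===== LEMMAS AND PROOFS =====

/-- Recursive form of B's single pass over `existing` with pending set `s`. -/
def pkPass (xs : List String) (s : PySem.Set String) : List String :=
  match xs with
  | [] => []
  | x :: t =>
    if PySem.Set.contains s x then pkPass t (PySem.Set.discard s x) else x :: pkPass t s

lemma pkPass_foldl (xs : List String) (acc : List String) (s : PySem.Set String) :
    (xs.foldl
      (fun (st : List String × PySem.Set String) x =>
        if PySem.Set.contains st.2 x then (st.1, PySem.Set.discard st.2 x)
        else (st.1 ++ [x], st.2)) (acc, s)).1 = acc ++ pkPass xs s := by
  induction xs generalizing acc s with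
  | nil => simp [pkPass]
  | cons x t ih =>
    simp only [List.foldl_cons, pkPass]
    by_cases h : PySem.Set.contains s x
    · rw [if_pos h, if_pos h, ih]
    · rw [if_neg h, if_neg h, ih]
      simp


/-- The pass depends on the pending set only through membership. -/
lemma pkPass_congr (xs : List String) (s t : PySem.Set String)
    (h : ∀ y, y ∈ s ↔ y ∈ t) : pkPass xs s = pkPass xs t := by
  induction xs generalizing s t with
  | nil => rfl
  | cons x xs ih =>
    have hc : PySem.Set.contains s x = PySem.Set.contains t x := by
      simp only [PySem.Set.contains]
      exact Bool.eq_iff_iff.mpr (by simpa using h x)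
    simp only [pkPass, hc]
    by_cases ht : PySem.Set.contains t x
    · rw [if_pos ht, if_pos ht]
      exact ih _ _ (fun y => by
        simp only [PySem.Set.discard, List.mem_filter]
        exact and_congr_left' (h y))
    · rw [if_neg ht, if_neg ht]
      exact congrArg (x :: ·) (ih _ _ h)

lemma pkPass_empty (xs : List String) : pkPass xs [] = xs := by
  induction xs with
  | nil => rfl
  | cons x t ih => simp [pkPass, PySem.Set.contains, ih]

/-- Inserting a fresh element into the pending set = erasing its first occurrence from the result. -/
lemma pkPass_insert (xs : List String) (s : List String) (p : String) (hp : p ∉ s) :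
    pkPass xs (p :: s) = (pkPass xs s).erase p := by
  induction xs generalizing s with
  | nil => rfl
  | cons x t ih =>
    by_cases hxp : x = p
    · subst hxp
      have hc : PySem.Set.contains (x :: s) x := by
        simp [PySem.Set.contains_eq_listContains, List.contains_iff_mem]
      have hnc : ¬ PySem.Set.contains s x := by
        simp [PySem.Set.contains_eq_listContains, List.contains_iff_mem, hp]
      simp only [pkPass]
      rw [if_pos hc, if_neg hnc, List.erase_cons_head]
      have : PySem.Set.discard (x :: s) x = PySem.Set.discard s x := by
        simp [PySem.Set.discard]
      rw [this]
      exact pkPass_congr t _ s (fun y => by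
        simp only [PySem.Set.discard, List.mem_filter]
        constructor
        · exact fun h => h.1
        · intro h; exact ⟨h, by simp; rintro rfl; exact hp h⟩)
    · have hc : PySem.Set.contains (p :: s) x = PySem.Set.contains s x := by
        simp [PySem.Set.contains_eq_listContains, List.contains_iff_mem, hxp]
      by_cases hx : PySem.Set.contains s x
      · have hd : PySem.Set.discard (p :: s) x = p :: PySem.Set.discard s x := by
          simp [PySem.Set.discard, List.filter_cons, Ne.symm hxp]
        have hp' : p ∉ PySem.Set.discard s x := by
          simp only [PySem.Set.discard, List.mem_filter]; exact fun h => hp h.1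
        simp only [pkPass, hc]
        rw [if_pos hx, if_pos hx, hd]
        exact ih (PySem.Set.discard s x) hp'
      · simp only [pkPass, hc]
        rw [if_neg hx, if_neg hx, List.erase_cons_tail (by simp [hxp]), ih s hp]

/-- A's `try: out.remove(p) except: pass` with `p` not in the prefix. -/
lemma pkRemove_append (F X : List String) (p : String) (hp : p ∉ F) :
    (PySem.List.remove? (F ++ X) p).getD (F ++ X) = F ++ X.erase p := by
  by_cases hx : p ∈ X
  · rw [PySem.List.remove?_eq_some_erase _ _ (by simp [hx])]
    simp [List.erase_append_right _ hp]
  · have : p ∉ F ++ X := by simp [hp, hx]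
    rw [(PySem.List.remove?_eq_none_iff _ _).mpr this]
    simp [List.erase_of_not_mem hx]

/-- A's remove/insert with `p` already in the (nodup) front prefix. -/
lemma pkRemove_append_mem (F X : List String) (p : String) (hp : p ∈ F) :
    (PySem.List.remove? (F ++ X) p).getD (F ++ X) = F.erase p ++ X := by
  rw [PySem.List.remove?_eq_some_erase _ _ (by simp [hp])]
  simp [List.erase_append_left _ hp]

lemma pkMain (preferred_first existing : List String) :
    prefer_kex_py existing preferred_first =
      PySem.List.dedup preferred_first ++
        pkPass existing (PySem.List.dedup preferred_first) := by
  induction preferred_first with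
  | nil => simp [prefer_kex_py, PySem.List.dedup, PySem.Set.ofList, pkPass_empty]
  | cons p rest ih =>
    have hstep : prefer_kex_py existing (p :: rest) =
        p :: ((PySem.List.remove? (prefer_kex_py existing rest) p).getD
          (prefer_kex_py existing rest)) := by
      simp [prefer_kex_py, List.reverse_cons, List.foldl_append]
    rw [hstep, ih]
    have hded : PySem.List.dedup (p :: rest) =
        p :: PySem.Set.discard (PySem.List.dedup rest) p := by
      simp [PySem.List.dedup, PySem.Set.ofList_cons]
    set F := PySem.List.dedup rest with hF
    by_cases hp : p ∈ F
    · have hnd : F.Nodup := by rw [hF]; simpa using PySem.Set.nodup_ofList (xs := rest)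
      have hdis : PySem.Set.discard F p = F.erase p := by
        simp only [PySem.Set.discard]
        rw [List.Nodup.erase_eq_filter hnd]
        exact List.filter_congr (fun y _ => by simp [bne])
      rw [pkRemove_append_mem _ _ _ hp, hded, hdis]
      have hcong : pkPass existing F = pkPass existing (p :: F.erase p) := by
        refine pkPass_congr _ _ _ (fun y => ?_)
        constructor
        · intro hy
          by_cases hyp : y = p
          · simp [hyp]
          · simp [List.mem_erase_of_ne hyp, hy]
        · intro hy
          rcases List.mem_cons.mp hy with h | h
          · exact h ▸ hp
          · exact List.mem_of_mem_erase h
      rw [hcong]; simp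
    · have hdis : PySem.Set.discard F p = F := by
        simp only [PySem.Set.discard]
        exact List.filter_eq_self.mpr (fun y hy => by simp; rintro rfl; exact hp hy)
      rw [pkRemove_append _ _ _ hp, hded, hdis, pkPass_insert _ _ _ hp]
      simp

-- ===== VERDICT (by name: the statement is the Claim_ definition above) =====
theorem prefer_kex_py_spec : Claim_equal_prefer_kex_py := by
  intro existing preferred_first _
  show prefer_kex_py existing preferred_first = prefer_kex_py_alt existing preferred_first
  have h : prefer_kex_py_alt existing preferred_first =
      PySem.List.dedup preferred_first ++
        (existing.foldl (fun (st : List String × PySem.Set String) x =>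
          if PySem.Set.contains st.2 x then (st.1, PySem.Set.discard st.2 x)
          else (st.1 ++ [x], st.2))
          ([], PySem.Set.ofList (PySem.List.dedup preferred_first))).1 := rfl
  rw [h, pkPass_foldl, pkMain]
  simp [PySem.List.dedup, PySem.Set.ofList_ofList]
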